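-- pv_equiv track=rewrite | github.com/caidog-xuqiu/xian-travel | app/services/poi_service.py | _top_up_with_mock
-- ===== SOURCE A (Python) =====
-- from typing import Any, Dict, Iterable, List
--
-- TARGET_SIGHTS = 8
--
-- TARGET_RESTAURANTS = 8
--
-- def _count_by_kind(pois: List[Dict[str, Any]], kind: str) -> int:
--     return sum(1 for poi in pois if poi.get("kind") == kind)
--
-- def _top_up_with_mock(
--     real_pois: List[Dict[str, Any]],
--     fallback_pois: List[Dict[str, Any]],
--     target_sights: int = TARGET_SIGHTS,
--     target_restaurants: int = TARGET_RESTAURANTS,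
-- ) -> List[Dict[str, Any]]:
--     merged = list(real_pois)
--     seen = {(p.get("kind"), p.get("district_cluster"), p.get("name")) for p in merged}
--
--     for kind, target in [("sight", target_sights), ("restaurant", target_restaurants)]:
--         need = target - _count_by_kind(merged, kind)
--         if need <= 0:
--             continue
--         for poi in fallback_pois:
--             if poi.get("kind") != kind:
--                 continue
--             key = (poi.get("kind"), poi.get("district_cluster"), poi.get("name"))
--             if key in seen:
--                 continue
--             merged.append(poi)
--             seen.add(key)
--             need -= 1
--             if need <= 0:
--                 break
--
--     return merged
-- ===== SOURCE B (Python) =====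
-- def _top_up_with_mock(
--     real_pois,
--     fallback_pois,
--     target_sights=8,
--     target_restaurants=8,
-- ):
--     # Declarative per-kind pipeline instead of A's stateful greedy loop:
--     # filter the kind's candidates, dedupe them by key with a dict of first
--     # occurrences, drop keys already present among the real POIs of that kind,
--     # and slice the result to the missing count.  No shared cross-kind seen
--     # set is needed because A's keys start with the kind itself, and no need
--     # counter/break is needed because slicing after the full dedup picks the
--     # same prefix A's early exit picks.
--     merged = list(real_pois)
--     for kind, target in (("sight", target_sights), ("restaurant", target_restaurants)):
--         have = [p for p in real_pois if p.get("kind") == kind]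
--         old = {(p.get("district_cluster"), p.get("name")) for p in have}
--         firsts = {}
--         for p in fallback_pois:
--             if p.get("kind") == kind:
--                 firsts.setdefault((p.get("district_cluster"), p.get("name")), p)
--         fresh = [p for key, p in firsts.items() if key not in old]
--         merged += fresh[: max(target - len(have), 0)]
--     return merged
-- ===== Notes on version B (the rewrite author's own statement) =====
-- stated objective: alternative
-- what changed: B replaces A's stateful greedy loop (shared seen set across kinds, need counter, break) by a per-kind declarative pipeline: filter the kind's fallbacks, dedupe them by (district_cluster, name) with a dict of first occurrences, drop keys already present among the real POIs of that kind, and slice the result to the missing count; this is correct because A's seen keys embed the kind, so cross-kind sharing is vacuous and slicing after a full dedup selects the same prefix as A's early exit.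
import Mathlib
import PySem

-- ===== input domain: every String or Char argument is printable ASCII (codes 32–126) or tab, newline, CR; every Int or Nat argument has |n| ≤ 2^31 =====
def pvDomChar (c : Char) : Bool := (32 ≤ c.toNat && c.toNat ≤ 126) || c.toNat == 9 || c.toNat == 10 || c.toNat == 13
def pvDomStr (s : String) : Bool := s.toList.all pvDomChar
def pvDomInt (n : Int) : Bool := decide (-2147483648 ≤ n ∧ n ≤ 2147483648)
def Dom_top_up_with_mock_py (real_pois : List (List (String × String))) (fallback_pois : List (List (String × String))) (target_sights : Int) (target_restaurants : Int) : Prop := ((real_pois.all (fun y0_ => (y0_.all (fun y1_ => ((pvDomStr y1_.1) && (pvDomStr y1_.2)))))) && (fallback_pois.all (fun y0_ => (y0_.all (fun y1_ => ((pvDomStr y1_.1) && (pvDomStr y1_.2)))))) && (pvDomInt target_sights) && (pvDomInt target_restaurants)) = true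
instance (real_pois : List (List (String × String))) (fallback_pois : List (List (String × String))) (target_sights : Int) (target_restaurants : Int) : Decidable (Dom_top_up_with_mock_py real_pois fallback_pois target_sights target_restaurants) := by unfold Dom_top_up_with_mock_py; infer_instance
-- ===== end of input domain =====

-- B replaces A's stateful greedy top-up (shared seen set, need counter, break) by a per-kind
-- filter → dict-of-first-occurrences dedup → drop-existing → slice pipeline (objective: alternative).

-- poi.get(k) for a poi given as an association list (Python dict)
def pvGet (p : List (String × String)) (k : String) : Option String :=
  PySem.Dict.get? (PySem.Dict.mk p) k

-- A's (kind, district_cluster, name) key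
def pvKey (p : List (String × String)) : Option String × Option String × Option String :=
  (pvGet p "kind", pvGet p "district_cluster", pvGet p "name")

-- B's per-kind (district_cluster, name) key
def pvKey2 (p : List (String × String)) : Option String × Option String :=
  (pvGet p "district_cluster", pvGet p "name")

-- ===== PORT A =====
-- sum(1 for poi in pois if poi.get("kind") == kind)
def count_by_kind_py (pois : List (List (String × String))) (kind : String) : Int :=
  pois.foldl (fun acc p => if pvGet p "kind" == some kind then acc + 1 else acc) 0

-- A's inner 'for poi in fallback_pois: …' loop; returns (appended pois, seen)
def pvFillA (kind : String) (fallback : List (List (String × String))) (need : Int)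
    (seen : PySem.Set (Option String × Option String × Option String)) :
    List (List (String × String)) × PySem.Set (Option String × Option String × Option String) :=
  match fallback with
  | [] => ([], seen)
  | p :: rest =>
    if ¬ (pvGet p "kind" == some kind) then pvFillA kind rest need seen
    else
      let key := (pvGet p "kind", pvGet p "district_cluster", pvGet p "name")
      if PySem.Set.contains seen key then pvFillA kind rest need seen
      else
        let seen' := PySem.Set.add seen key
        if need - 1 ≤ 0 then ([p], seen')
        else
          let r := pvFillA kind rest (need - 1) seen'
          (p :: r.1, r.2)

def top_up_with_mock_py (real_pois : List (List (String × String))) (fallback_pois : List (List (String × String))) (target_sights : Int) (target_restaurants : Int) : List (List (String × String)) :=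
  let merged := real_pois
  let seen := PySem.Set.ofList (merged.map pvKey)
  (List.foldl
    (fun st kt =>
      let need := kt.2 - count_by_kind_py st.1 kt.1
      if need ≤ 0 then st
      else
        let r := pvFillA kt.1 fallback_pois need st.2
        (st.1 ++ r.1, r.2))
    (merged, seen)
    [("sight", target_sights), ("restaurant", target_restaurants)]).1

-- ===== PORT B =====
def top_up_with_mock_py_alt (real_pois : List (List (String × String))) (fallback_pois : List (List (String × String))) (target_sights : Int) (target_restaurants : Int) : List (List (String × String)) :=
  List.foldl
    (fun merged kt =>
      -- have = [p for p in real_pois if p.get("kind") == kind]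
      let hav := real_pois.filter (fun p => pvGet p "kind" == some kt.1)
      -- old = {(p.get("district_cluster"), p.get("name")) for p in have}
      let old := PySem.Set.ofList (hav.map pvKey2)
      -- firsts: dict of first occurrences, built with setdefault under the kind test
      let firsts := fallback_pois.foldl
        (fun d p => if pvGet p "kind" == some kt.1 then d.setdefault (pvKey2 p) p else d)
        (PySem.Dict.empty : PySem.Dict (Option String × Option String) (List (String × String)))
      -- fresh = [p for key, p in firsts.items() if key not in old]
      let fresh := (firsts.items.filter (fun kp => !(PySem.Set.contains old kp.1))).map (·.2)
      -- merged += fresh[: max(target - len(have), 0)]   (slice with a nonnegative bound = take)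
      merged ++ fresh.take (max (kt.2 - (hav.length : Int)) 0).toNat)
    real_pois
    [("sight", target_sights), ("restaurant", target_restaurants)]

-- ===== PRECONDITION & SPEC =====
def Spec_top_up_with_mock_py (real_pois : List (List (String × String))) (fallback_pois : List (List (String × String))) (target_sights : Int) (target_restaurants : Int) (out : List (List (String × String))) : Prop := out = top_up_with_mock_py_alt real_pois fallback_pois target_sights target_restaurants
instance (real_pois : List (List (String × String))) (fallback_pois : List (List (String × String))) (target_sights : Int) (target_restaurants : Int) (out : List (List (String × String))) : Decidable (Spec_top_up_with_mock_py real_pois fallback_pois target_sights target_restaurants out) := by unfold Spec_top_up_with_mock_py; infer_instance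

-- ===== CLAIM (what is proved, stated in full; the proofs are below) =====
def Claim_equal_top_up_with_mock_py : Prop := ∀ (real_pois : List (List (String × String))) (fallback_pois : List (List (String × String))) (target_sights : Int) (target_restaurants : Int), Dom_top_up_with_mock_py real_pois fallback_pois target_sights target_restaurants → Spec_top_up_with_mock_py real_pois fallback_pois target_sights target_restaurants (top_up_with_mock_py real_pois fallback_pois target_sights target_restaurants)

-- ===== LEMMAS AND PROOFS =====

-- A's phase loop restricted to the kind-filtered candidates (proof intermediate)
def pvFillC (kind : String) (need : Int)
    (seen : PySem.Set (Option String × Option String × Option String)) :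
    List (List (String × String)) →
    List (List (String × String)) × PySem.Set (Option String × Option String × Option String)
  | [] => ([], seen)
  | p :: rest =>
    if need ≤ 0 then ([], seen)
    else if PySem.Set.contains seen (some kind, pvGet p "district_cluster", pvGet p "name") then
      pvFillC kind need seen rest
    else
      (p :: (pvFillC kind (need - 1)
              (PySem.Set.add seen (some kind, pvGet p "district_cluster", pvGet p "name")) rest).1,
       (pvFillC kind (need - 1)
              (PySem.Set.add seen (some kind, pvGet p "district_cluster", pvGet p "name")) rest).2)

-- first-occurrence dedup of a candidate list, keys in acc blocked
def pvDedup (acc : List (Option String × Option String)) :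
    List (List (String × String)) → List (List (String × String))
  | [] => []
  | p :: rest =>
    if pvKey2 p ∈ acc then pvDedup acc rest
    else p :: pvDedup (acc ++ [pvKey2 p]) rest

theorem pvDedup_congr (acc acc' : List (Option String × Option String))
    (h : ∀ k, k ∈ acc ↔ k ∈ acc') :
    ∀ cand, pvDedup acc cand = pvDedup acc' cand := by
  intro cand
  induction cand generalizing acc acc' with
  | nil => rfl
  | cons p rest ih =>
    rw [pvDedup, pvDedup]
    by_cases hm : pvKey2 p ∈ acc
    · rw [if_pos hm, if_pos ((h _).1 hm), ih _ _ h]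
    · rw [if_neg hm, if_neg (fun hc => hm ((h _).2 hc)), ih (acc ++ [pvKey2 p]) (acc' ++ [pvKey2 p])]
      intro k; simp only [List.mem_append]; exact or_congr_left (h k)

theorem pvDedup_filter (S : List (Option String × Option String)) :
    ∀ (cand : List (List (String × String))) (T : List (Option String × Option String)),
      (pvDedup T cand).filter (fun p => !decide (pvKey2 p ∈ S)) = pvDedup (S ++ T) cand := by
  intro cand
  induction cand with
  | nil => intro T; rfl
  | cons p rest ih =>
    intro T
    rw [pvDedup, pvDedup]
    by_cases hT : pvKey2 p ∈ T
    · rw [if_pos hT, if_pos (by simp [hT]), ih]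
    · rw [if_neg hT]
      by_cases hS : pvKey2 p ∈ S
      · rw [if_pos (by simp [hS]), List.filter_cons]
        simp only [hS, decide_true, Bool.not_true, Bool.false_eq_true, if_neg, not_false_eq_true]
        rw [ih, pvDedup_congr (S ++ (T ++ [pvKey2 p])) (S ++ T)]
        intro k; simp only [List.mem_append, List.mem_singleton]
        constructor
        · rintro (h | h | rfl) <;> simp_all
        · rintro (h | h) <;> simp_all
      · rw [if_neg (by simp [hT, hS]), List.filter_cons]
        simp only [hS, decide_false, Bool.not_false, if_pos]
        rw [ih, List.append_assoc]

-- the setdefault loop over the candidates builds exactly the first-occurrence dedup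
theorem pvFirsts_items :
    ∀ (cand : List (List (String × String)))
      (d : PySem.Dict (Option String × Option String) (List (String × String))),
      d.keys.Nodup →
      (cand.foldl (fun d p => d.setdefault (pvKey2 p) p) d).items
        = d.items ++ (pvDedup d.keys cand).map (fun p => (pvKey2 p, p)) := by
  intro cand
  induction cand with
  | nil => intro d _; simp [pvDedup]
  | cons p rest ih =>
    intro d hnd
    simp only [List.foldl_cons]
    by_cases hc : d.contains (pvKey2 p) = true
    · rw [PySem.Dict.setdefault_of_contains d p hc, ih d hnd, pvDedup,
        if_pos ((PySem.Dict.contains_iff_mem_keys d _).1 hc)]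
    · have hcf : d.contains (pvKey2 p) = false := by simpa using hc
      rw [PySem.Dict.setdefault_of_not_contains d p hcf,
        ih _ (PySem.Dict.nodup_keys_insert d _ _ hnd), pvDedup,
        if_neg (fun hm => hc ((PySem.Dict.contains_iff_mem_keys d _).2 hm)),
        PySem.Dict.items_insert_of_not_contains d p hcf,
        PySem.Dict.keys_insert_of_not_contains d p hcf]
      simp

-- A's phase loop keeps the first need.toNat freshly-keyed candidates
theorem pvFillC_take (kind : String) :
    ∀ (cand : List (List (String × String))) (need : Int)
      (seen : PySem.Set (Option String × Option String × Option String))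
      (S : List (Option String × Option String)),
      (∀ k2 : Option String × Option String,
        PySem.Set.contains seen (some kind, k2.1, k2.2) = decide (k2 ∈ S)) →
      (pvFillC kind need seen cand).1 = (pvDedup S cand).take need.toNat := by
  intro cand
  induction cand with
  | nil => intro need seen S _; simp [pvFillC, pvDedup]
  | cons p rest ih =>
    intro need seen S hS
    rw [pvFillC, pvDedup]
    by_cases hneed : need ≤ 0
    · rw [if_pos hneed]
      have h0 : need.toNat = 0 := Int.toNat_of_nonpos hneed
      simp [h0]
    · rw [if_neg hneed]
      have hkey : PySem.Set.contains seen (some kind, pvGet p "district_cluster", pvGet p "name")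
          = decide (pvKey2 p ∈ S) := hS (pvKey2 p)
      by_cases hm : pvKey2 p ∈ S
      · have ht : PySem.Set.contains seen (some kind, pvGet p "district_cluster", pvGet p "name") = true := by
          rw [hkey]; exact decide_eq_true hm
        rw [if_pos hm, if_pos ht, ih _ _ _ hS]
      · have hcf : PySem.Set.contains seen (some kind, pvGet p "district_cluster", pvGet p "name") = false := by
          rw [hkey]; exact decide_eq_false hm
        rw [if_neg hm, if_neg (by rw [hcf]; simp)]
        have htn : need.toNat = (need - 1).toNat + 1 := by omega
        rw [htn, List.take_succ_cons]
        have hS' : ∀ k2 : Option String × Option String,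
            PySem.Set.contains
              (PySem.Set.add seen (some kind, pvGet p "district_cluster", pvGet p "name"))
              (some kind, k2.1, k2.2) = decide (k2 ∈ S ++ [pvKey2 p]) := by
          intro k2
          have h1 : ((some kind, k2.1, k2.2) ∈ seen) ↔ k2 ∈ S := by
            rw [← PySem.Set.contains_iff, hS k2]; simp
          have h2 : ((some kind, k2.1, k2.2)
              = ((some kind, pvGet p "district_cluster", pvGet p "name") :
                  Option String × Option String × Option String)) ↔ k2 = pvKey2 p := by
            rcases k2 with ⟨a, b⟩; simp [pvKey2, Prod.ext_iff]
          rw [Bool.eq_iff_iff]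
          rw [PySem.Set.contains_iff, PySem.Set.mem_add]
          simp only [decide_eq_true_eq, List.mem_append, List.mem_singleton, h1, h2]
        rw [ih (need - 1) _ (S ++ [pvKey2 p]) hS']

-- keys of other kinds stay untouched by a phase
theorem pvFillC_seen (kind : String) :
    ∀ (cand : List (List (String × String))) (need : Int)
      (seen : PySem.Set (Option String × Option String × Option String))
      (x : Option String × Option String × Option String), x.1 ≠ some kind →
      PySem.Set.contains (pvFillC kind need seen cand).2 x = PySem.Set.contains seen x := by
  intro cand
  induction cand with
  | nil => intro need seen x _; rfl
  | cons p rest ih =>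
    intro need seen x hx
    rw [pvFillC]
    by_cases hneed : need ≤ 0
    · rw [if_pos hneed]
    · rw [if_neg hneed]
      by_cases hc : PySem.Set.contains seen (some kind, pvGet p "district_cluster", pvGet p "name") = true
      · rw [if_pos hc]
        exact ih _ _ _ hx
      · rw [if_neg hc]
        have hstep : PySem.Set.contains
            (PySem.Set.add seen (some kind, pvGet p "district_cluster", pvGet p "name")) x
            = PySem.Set.contains seen x := by
          have h2 : x ≠ ((some kind, pvGet p "district_cluster", pvGet p "name") :
              Option String × Option String × Option String) := by
            intro he; exact hx (by rw [he])
          rw [Bool.eq_iff_iff, PySem.Set.contains_iff, PySem.Set.contains_iff, PySem.Set.mem_add]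
          simp [h2]
        rw [ih _ _ _ hx, hstep]

-- A's phase loop over all fallbacks equals pvFillC over the kind-filtered candidates
theorem pvFillC_nonpos (kind : String) (need : Int) (h : need ≤ 0)
    (seen : PySem.Set (Option String × Option String × Option String))
    (l : List (List (String × String))) : pvFillC kind need seen l = ([], seen) := by
  cases l with
  | nil => rfl
  | cons p rest => simp [pvFillC, h]

theorem pv_fill_eq (kind : String) :
    ∀ (fb : List (List (String × String))) (need : Int) (seen : PySem.Set (Option String × Option String × Option String)),
      1 ≤ need →
      pvFillA kind fb need seen
        = pvFillC kind need seen (fb.filter (fun p => pvGet p "kind" == some kind)) := by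
  intro fb
  induction fb with
  | nil => intro need seen _; rfl
  | cons p rest ih =>
    intro need seen hne
    by_cases hk : (pvGet p "kind" == some kind) = true
    · have hkv : pvGet p "kind" = some kind := by rwa [beq_iff_eq] at hk
      have hnp : ¬ need ≤ 0 := by omega
      simp only [List.filter_cons, hk, if_true]
      rw [pvFillA, pvFillC]
      rw [if_neg (by simp [hk]), if_neg hnp]
      simp only [hkv]
      by_cases hm : PySem.Set.contains seen (some kind, pvGet p "district_cluster", pvGet p "name") = true
      · rw [if_pos hm, if_pos hm]
        exact ih _ _ hne
      · rw [if_neg hm, if_neg hm]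
        by_cases h1 : need - 1 ≤ 0
        · rw [if_pos h1, pvFillC_nonpos kind (need - 1) h1]
        · rw [if_neg h1, ih _ _ (by omega)]
    · have hkf : (pvGet p "kind" == some kind) = false := by simpa using hk
      simp only [List.filter_cons, hkf, Bool.false_eq_true, if_false]
      rw [pvFillA, if_pos (by simp [hk])]
      exact ih _ _ hne

-- everything A appends in a phase has that phase's kind
theorem pv_fillA_kind (kind : String) :
    ∀ (fb : List (List (String × String))) (need : Int) (seen : PySem.Set (Option String × Option String × Option String)) (p : List (String × String)),
      p ∈ (pvFillA kind fb need seen).1 → pvGet p "kind" = some kind := by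
  intro fb
  induction fb with
  | nil => intro need seen p h; simp [pvFillA] at h
  | cons q rest ih =>
    intro need seen p h
    rw [pvFillA] at h
    by_cases hk : (pvGet q "kind" == some kind) = true
    · simp only [hk, not_true, if_neg, not_false_eq_true] at h
      by_cases hm : PySem.Set.contains seen (pvGet q "kind", pvGet q "district_cluster", pvGet q "name") = true
      · simp only [hm, if_pos] at h; exact ih _ _ _ h
      · simp only [hm, Bool.false_eq_true, if_neg, not_false_eq_true] at h
        by_cases h1 : need - 1 ≤ 0
        · simp only [h1, if_pos, List.mem_singleton] at h
          subst h; rwa [beq_iff_eq] at hk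
        · simp only [h1, if_neg, not_false_eq_true, List.mem_cons] at h
          rcases h with h | h
          · subst h; rwa [beq_iff_eq] at hk
          · exact ih _ _ _ h
    · simp only [hk, Bool.false_eq_true, not_false_eq_true, if_pos] at h
      exact ih _ _ _ h

-- A's count as a countP
theorem pv_count_eq (kind : String) (l : List (List (String × String))) :
    count_by_kind_py l kind = (l.countP (fun p => pvGet p "kind" == some kind) : Int) := by
  rw [count_by_kind_py, PySem.List.foldl_if_add_one]
  simp

-- appending pois of another kind does not change a kind's count
theorem pv_count_append_other (kind kind' : String) (hne : kind ≠ kind')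
    (l app : List (List (String × String)))
    (hall : ∀ p ∈ app, pvGet p "kind" = some kind') :
    count_by_kind_py (l ++ app) kind = count_by_kind_py l kind := by
  rw [pv_count_eq, pv_count_eq, List.countP_append]
  have h0 : app.countP (fun p => pvGet p "kind" == some kind) = 0 := by
    rw [List.countP_eq_zero]
    intro p hp
    rw [hall p hp]
    simp [hne.symm]
  simp [h0]

-- the initial seen set answers kind-keyed queries like the kind's real keys
theorem pv_seen_base (kind : String) (real : List (List (String × String)))
    (k2 : Option String × Option String) :
    PySem.Set.contains (PySem.Set.ofList (real.map pvKey)) (some kind, k2.1, k2.2)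
      = decide (k2 ∈ (real.filter (fun p => pvGet p "kind" == some kind)).map pvKey2) := by
  rw [Bool.eq_iff_iff, PySem.Set.contains_iff, PySem.Set.mem_ofList]
  simp only [decide_eq_true_eq, List.mem_map, List.mem_filter, beq_iff_eq]
  constructor
  · rintro ⟨p, hp, hkey⟩
    rcases k2 with ⟨a, b⟩
    refine ⟨p, ⟨hp, ?_⟩, ?_⟩ <;> simp_all [pvKey, pvKey2, Prod.ext_iff]
  · rintro ⟨p, ⟨hp, hk⟩, hkey⟩
    rcases k2 with ⟨a, b⟩
    exact ⟨p, hp, by simp_all [pvKey, pvKey2, Prod.ext_iff]⟩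

-- B's phase pipeline reduces to take over the blocked dedup
theorem pv_phaseB_eq (kind : String) (real fb : List (List (String × String))) (target : Int) :
    (((fb.foldl
        (fun d p => if pvGet p "kind" == some kind then d.setdefault (pvKey2 p) p else d)
        (PySem.Dict.empty : PySem.Dict (Option String × Option String) (List (String × String)))).items.filter
          (fun kp => !(PySem.Set.contains
              (PySem.Set.ofList ((real.filter (fun p => pvGet p "kind" == some kind)).map pvKey2)) kp.1))).map (·.2)).take
        (max (target - ((real.filter (fun p => pvGet p "kind" == some kind)).length : Int)) 0).toNat
      = (pvDedup ((real.filter (fun p => pvGet p "kind" == some kind)).map pvKey2)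
          (fb.filter (fun p => pvGet p "kind" == some kind))).take
        (max (target - ((real.filter (fun p => pvGet p "kind" == some kind)).length : Int)) 0).toNat := by
  congr 1
  rw [PySem.List.foldl_if_eq_foldl_filter]
  rw [pvFirsts_items _ PySem.Dict.empty (by simp)]
  have hkeys : (PySem.Dict.empty : PySem.Dict (Option String × Option String) (List (String × String))).keys = [] := by
    simp
  have hemp : (PySem.Dict.empty : PySem.Dict (Option String × Option String) (List (String × String))).items = [] := rfl
  rw [hkeys, hemp, List.nil_append]
  rw [List.filter_map, List.map_map]
  have hpred : ∀ p : List (String × String), p ∈ pvDedup [] (fb.filter (fun p => pvGet p "kind" == some kind)) →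
      (((fun kp : (Option String × Option String) × List (String × String) =>
          !(PySem.Set.contains (PySem.Set.ofList ((real.filter (fun p => pvGet p "kind" == some kind)).map pvKey2)) kp.1))
        ∘ (fun p => (pvKey2 p, p))) p)
        = !decide (pvKey2 p ∈ (real.filter (fun p => pvGet p "kind" == some kind)).map pvKey2) := by
    intro p _
    simp only [Function.comp_apply]
    congr 1
    rw [Bool.eq_iff_iff, PySem.Set.contains_iff, PySem.Set.mem_ofList]
    simp
  rw [List.filter_congr hpred, pvDedup_filter, List.append_nil]
  have hid : ((fun kp : (Option String × Option String) × List (String × String) => kp.2)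
      ∘ (fun p : List (String × String) => (pvKey2 p, p))) = id := rfl
  rw [hid, List.map_id]

-- ===== VERDICT (by name: the statement is the Claim_ definition above) =====
theorem top_up_with_mock_py_spec : Claim_equal_top_up_with_mock_py := by
  intro real fb ts tr _
  unfold Spec_top_up_with_mock_py top_up_with_mock_py top_up_with_mock_py_alt
  simp only [List.foldl_cons, List.foldl_nil]
  rw [pv_phaseB_eq "sight" real fb ts, pv_phaseB_eq "restaurant" real fb tr]
  have hlen1 : count_by_kind_py real "sight"
      = ((real.filter (fun p => pvGet p "kind" == some "sight")).length : Int) := by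
    rw [pv_count_eq, List.countP_eq_length_filter]
  have hlen2 : count_by_kind_py real "restaurant"
      = ((real.filter (fun p => pvGet p "kind" == some "restaurant")).length : Int) := by
    rw [pv_count_eq, List.countP_eq_length_filter]
  by_cases hs : ts - count_by_kind_py real "sight" ≤ 0
  · rw [if_pos hs]
    dsimp only
    have hmax1 : max (ts - ((real.filter (fun p => pvGet p "kind" == some "sight")).length : Int)) 0 = 0 :=
      max_eq_right (by omega)
    rw [hmax1]
    simp only [Int.toNat_zero, List.take_zero, List.append_nil]
    by_cases hr : tr - count_by_kind_py real "restaurant" ≤ 0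
    · rw [if_pos hr]
      dsimp only
      have hmax2 : max (tr - ((real.filter (fun p => pvGet p "kind" == some "restaurant")).length : Int)) 0 = 0 :=
        max_eq_right (by omega)
      rw [hmax2]
      simp only [Int.toNat_zero, List.take_zero, List.append_nil]
    · rw [if_neg hr]
      dsimp only
      have hmax2 : max (tr - ((real.filter (fun p => pvGet p "kind" == some "restaurant")).length : Int)) 0
          = tr - count_by_kind_py real "restaurant" := by
        rw [← hlen2]; exact max_eq_left (by omega)
      rw [hmax2]
      congr 1
      rw [pv_fill_eq "restaurant" fb _ _ (by omega)]
      exact pvFillC_take "restaurant" _ _ _ _ (fun k2 => pv_seen_base "restaurant" real k2)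
  · rw [if_neg hs]
    dsimp only
    have h1 : 1 ≤ ts - count_by_kind_py real "sight" := by omega
    have hfill1 := pv_fill_eq "sight" fb (ts - count_by_kind_py real "sight")
      (PySem.Set.ofList (real.map pvKey)) h1
    have htake1 : (pvFillA "sight" fb (ts - count_by_kind_py real "sight")
        (PySem.Set.ofList (real.map pvKey))).1
        = (pvDedup ((real.filter (fun p => pvGet p "kind" == some "sight")).map pvKey2)
            (fb.filter (fun p => pvGet p "kind" == some "sight"))).take
          (ts - count_by_kind_py real "sight").toNat := by
      rw [hfill1]
      exact pvFillC_take "sight" _ _ _ _ (fun k2 => pv_seen_base "sight" real k2)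
    have hmax1 : max (ts - ((real.filter (fun p => pvGet p "kind" == some "sight")).length : Int)) 0
        = ts - count_by_kind_py real "sight" := by
      rw [← hlen1]; exact max_eq_left (by omega)
    rw [hmax1, ← htake1]
    have hcnt2 : count_by_kind_py (real ++ (pvFillA "sight" fb (ts - count_by_kind_py real "sight")
        (PySem.Set.ofList (real.map pvKey))).1) "restaurant" = count_by_kind_py real "restaurant" :=
      pv_count_append_other "restaurant" "sight" (by decide) real _
        (fun p hp => pv_fillA_kind "sight" fb _ _ p hp)
    rw [hcnt2]
    have hS2 : ∀ k2 : Option String × Option String,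
        PySem.Set.contains (pvFillA "sight" fb (ts - count_by_kind_py real "sight")
          (PySem.Set.ofList (real.map pvKey))).2 (some "restaurant", k2.1, k2.2)
          = decide (k2 ∈ (real.filter (fun p => pvGet p "kind" == some "restaurant")).map pvKey2) := by
      intro k2
      rw [hfill1, pvFillC_seen "sight" _ _ _ _ (by simp)]
      exact pv_seen_base "restaurant" real k2
    by_cases hr : tr - count_by_kind_py real "restaurant" ≤ 0
    · rw [if_pos hr]
      dsimp only
      have hmax2 : max (tr - ((real.filter (fun p => pvGet p "kind" == some "restaurant")).length : Int)) 0 = 0 :=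
        max_eq_right (by omega)
      rw [hmax2]
      simp only [Int.toNat_zero, List.take_zero, List.append_nil]
    · rw [if_neg hr]
      dsimp only
      have hmax2 : max (tr - ((real.filter (fun p => pvGet p "kind" == some "restaurant")).length : Int)) 0
          = tr - count_by_kind_py real "restaurant" := by
        rw [← hlen2]; exact max_eq_left (by omega)
      rw [hmax2]
      congr 1
      rw [pv_fill_eq "restaurant" fb _ _ (by omega)]
      exact pvFillC_take "restaurant" _ _ _ _ hS2
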